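-- pv_equiv track=rewrite | github.com/pypi-data/pypi-mirror-395 | packages/django-oscarbot/django_oscarbot-0.85.tar.gz/django_oscarbot-0.85/oscarbot/router.py | refactoring_path
-- ===== SOURCE A (Python) =====
-- def refactoring_path(path: str) -> str:
--     """Refactoring path"""
--     path_result = ''
--     space = False
--     for p in path:
--         if p.isspace():
--             if not space:
--                 p = '/<'
--                 space = True
--             else:
--                 p = '>/'
--                 space = False
--         path_result += p
--     if space:
--         path_result += '>/'
--     return path_result
-- ===== SOURCE B (Python) =====
-- def refactoring_path(path: str) -> str:
--     """Refactoring path"""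
--     # tokenize: split at every whitespace character (empty segments kept)
--     segs = []
--     cur = []
--     for ch in path:
--         if ch.isspace():
--             segs.append(''.join(cur))
--             cur = []
--         else:
--             cur.append(ch)
--     segs.append(''.join(cur))
--     # assemble pairwise: each full pair of segments becomes first + open marker + second + close marker
--     out = []
--     i = 0
--     while i + 1 < len(segs):
--         out.append(segs[i] + '/<' + segs[i + 1] + '>/')
--         i += 2
--     if i < len(segs):
--         out.append(segs[i])
--     return ''.join(out)
-- ===== Notes on version B (the rewrite author's own statement) =====
-- stated objective: alternative
-- what changed: A is a single scan with a toggling boolean that substitutes each whitespace character in place; B first tokenizes the path into whitespace-separated segments (empties kept) and then assembles the result by chunking the segment list into pairs, wrapping each full pair in the open/close markers and leaving a lone last segment unchanged.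
import Mathlib
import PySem

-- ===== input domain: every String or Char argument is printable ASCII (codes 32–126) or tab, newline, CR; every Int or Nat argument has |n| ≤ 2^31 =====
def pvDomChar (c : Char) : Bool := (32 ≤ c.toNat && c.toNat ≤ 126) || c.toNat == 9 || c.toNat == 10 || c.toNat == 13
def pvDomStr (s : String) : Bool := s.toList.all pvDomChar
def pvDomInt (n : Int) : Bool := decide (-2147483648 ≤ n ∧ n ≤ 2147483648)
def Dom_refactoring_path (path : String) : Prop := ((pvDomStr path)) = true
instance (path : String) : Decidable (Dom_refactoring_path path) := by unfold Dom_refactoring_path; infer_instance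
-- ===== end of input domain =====

-- B replaces A's single toggling scan by tokenize-then-pairwise-assembly (same cost, alternative decomposition).

-- ===== PORT A =====
-- one scan; state = (accumulated chars, space-toggle flag)
def pvAStep (st : List Char × Bool) (p : Char) : List Char × Bool :=
  if PySem.Chars.isspace p then
    if !st.2 then (st.1 ++ ['/', '<'], true) else (st.1 ++ ['>', '/'], false)
  else (st.1 ++ [p], st.2)

def refactoring_path (path : String) : String :=
  let st := path.toList.foldl pvAStep ([], false)
  String.mk (if st.2 then st.1 ++ ['>', '/'] else st.1)

-- ===== PORT B =====
-- tokenizer: segments split at each whitespace char (state = finished segments, current segment)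
def pvTokStep (st : List (List Char) × List Char) (ch : Char) : List (List Char) × List Char :=
  if PySem.Chars.isspace ch then (st.1 ++ [st.2], []) else (st.1, st.2 ++ [ch])

def pvTokenize (cs : List Char) : List (List Char) :=
  let st := cs.foldl pvTokStep ([], [])
  st.1 ++ [st.2]

-- pairwise assembly: each full pair (a, b) becomes a ++ '/<' ++ b ++ '>/', a lone last segment stays
def pvPairs : List (List Char) → List Char
  | [] => []
  | [a] => a
  | a :: b :: rest => a ++ ['/', '<'] ++ b ++ ['>', '/'] ++ pvPairs rest

def refactoring_path_alt (path : String) : String :=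
  String.mk (pvPairs (pvTokenize path.toList))

-- ===== PRECONDITION & SPEC =====
def Spec_refactoring_path (path : String) (out : String) : Prop := out = refactoring_path_alt path
instance (path : String) (out : String) : Decidable (Spec_refactoring_path path out) := by
  unfold Spec_refactoring_path; infer_instance

-- ===== CLAIM =====
def Claim_equal_refactoring_path : Prop :=
  ∀ (path : String), Dom_refactoring_path path → Spec_refactoring_path path (refactoring_path path)

-- ===== LEMMAS AND PROOFS =====

-- reference split: segments of cs cut at whitespace characters
def pvSplitWS : List Char → List (List Char)
  | [] => [[]]
  | c :: cs =>
    if PySem.Chars.isspace c then [] :: pvSplitWS cs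
    else match pvSplitWS cs with
      | s :: t => (c :: s) :: t
      | [] => [[c]]

lemma pvSplitWS_ne_nil (cs : List Char) : pvSplitWS cs ≠ [] := by
  induction cs with
  | nil => simp [pvSplitWS]
  | cons c cs ih =>
    simp only [pvSplitWS]
    split
    · simp
    · cases h : pvSplitWS cs <;> simp

-- A's result, expressed on the segment list, with the toggle flag explicit
def pvAsm : Bool → List (List Char) → List Char
  | b, [] => if b then ['>', '/'] else []
  | b, [s] => s ++ (if b then ['>', '/'] else [])
  | b, s :: s' :: rest =>
      s ++ (if b then ['>', '/'] else ['/', '<']) ++ pvAsm (!b) (s' :: rest)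

lemma pvAsm_cons_cons (b : Bool) (s s' : List Char) (rest : List (List Char)) :
    pvAsm b (s :: s' :: rest)
      = s ++ (if b then ['>', '/'] else ['/', '<']) ++ pvAsm (!b) (s' :: rest) := rfl

-- A's scan from an arbitrary state equals acc ++ pvAsm b (pvSplitWS cs)
lemma pvA_loop (cs : List Char) : ∀ (acc : List Char) (b : Bool),
    (if (cs.foldl pvAStep (acc, b)).2 then (cs.foldl pvAStep (acc, b)).1 ++ ['>', '/']
     else (cs.foldl pvAStep (acc, b)).1)
      = acc ++ pvAsm b (pvSplitWS cs) := by
  induction cs with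
  | nil =>
    intro acc b
    cases b <;> simp [pvSplitWS, pvAsm]
  | cons c cs ih =>
    intro acc b
    obtain ⟨s, t, hst⟩ : ∃ s t, pvSplitWS cs = s :: t := by
      cases h : pvSplitWS cs with
      | nil => exact absurd h (pvSplitWS_ne_nil cs)
      | cons s t => exact ⟨s, t, rfl⟩
    by_cases hc : PySem.Chars.isspace c = true
    · cases b with
      | false =>
        simp only [List.foldl_cons, pvAStep, hc, if_pos, Bool.not_false]
        rw [ih (acc ++ ['/', '<']) true]
        simp [pvSplitWS, hc, hst, pvAsm_cons_cons]
      | true =>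
        simp only [List.foldl_cons, pvAStep, hc, if_pos, Bool.not_true, if_false,
          Bool.false_eq_true]
        rw [ih (acc ++ ['>', '/']) false]
        simp [pvSplitWS, hc, hst, pvAsm_cons_cons]
    · simp only [List.foldl_cons, pvAStep, hc, if_false, Bool.false_eq_true]
      rw [ih (acc ++ [c]) b]
      have hsplit : pvSplitWS (c :: cs) = (c :: s) :: t := by
        simp [pvSplitWS, hc, hst]
      rw [hsplit, hst]
      cases t <;> simp [pvAsm]

lemma pvA_eq (path : String) :
    refactoring_path path = String.mk (pvAsm false (pvSplitWS path.toList)) := by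
  unfold refactoring_path
  simp only []
  rw [pvA_loop path.toList [] false]
  simp

-- the tokenizer from an arbitrary state, against the reference split
lemma pvTok_loop (cs : List Char) : ∀ (done : List (List Char)) (cur : List Char),
    (cs.foldl pvTokStep (done, cur)).1 ++ [(cs.foldl pvTokStep (done, cur)).2]
      = done ++ (match pvSplitWS cs with
                 | s :: t => (cur ++ s) :: t
                 | [] => [cur]) := by
  induction cs with
  | nil => intro done cur; simp [pvSplitWS]
  | cons c cs ih =>
    intro done cur
    obtain ⟨s, t, hst⟩ : ∃ s t, pvSplitWS cs = s :: t := by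
      cases h : pvSplitWS cs with
      | nil => exact absurd h (pvSplitWS_ne_nil cs)
      | cons s t => exact ⟨s, t, rfl⟩
    by_cases hc : PySem.Chars.isspace c = true
    · simp only [List.foldl_cons, pvTokStep, hc, if_pos]
      rw [ih (done ++ [cur]) []]
      simp [pvSplitWS, hc, hst]
    · simp only [List.foldl_cons, pvTokStep, hc, if_false, Bool.false_eq_true]
      rw [ih done (cur ++ [c])]
      simp [pvSplitWS, hc, hst]

lemma pvTok_eq (cs : List Char) : pvTokenize cs = pvSplitWS cs := by
  unfold pvTokenize
  simp only []
  rw [pvTok_loop cs [] []]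
  obtain ⟨s, t, hst⟩ : ∃ s t, pvSplitWS cs = s :: t := by
    cases h : pvSplitWS cs with
    | nil => exact absurd h (pvSplitWS_ne_nil cs)
    | cons s t => exact ⟨s, t, rfl⟩
  simp [hst]

-- pairwise assembly equals A's toggled assembly starting from 'false'
lemma pvPairs_eq_asm : ∀ (l : List (List Char)), pvPairs l = pvAsm false l
  | [] => rfl
  | [a] => by simp [pvPairs, pvAsm]
  | a :: b :: rest => by
    have ih := pvPairs_eq_asm rest
    cases rest with
    | nil => simp [pvPairs, pvAsm]
    | cons c t =>
      simp only [pvPairs, ih, pvAsm_cons_cons, Bool.not_false, Bool.not_true]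
      simp

-- ===== VERDICT =====
theorem refactoring_path_spec : Claim_equal_refactoring_path := by
  intro path _
  unfold Spec_refactoring_path refactoring_path_alt
  rw [pvA_eq, pvTok_eq, pvPairs_eq_asm]
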